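-- pv_equiv track=rewrite | github.com/ciao0228/bio_pro1 | showproject/data.py | field_deal
-- ===== SOURCE A (Python) =====
-- def field_deal(matrix, string_splits):
--     a = []
--     for i in matrix:
--         a.append(
--             i.split(string_splits)
--         )
--     a.sort(key=lambda x: x[1])
--     b = []
--     if len(a) != 0:
--         field_name = a[0][1]
--         alls = [field_name]
--         for i in a:
--             if i[1] == field_name:
--                 alls.append(
--                     i[0]
--                 )
--             else:
--                 b.append(
--                     alls
--                 )
--                 field_name = i[1]
--                 alls = [field_name, i[0]]
--         b.append(alls)
--     return b
-- ===== SOURCE B (Python) =====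
-- def field_deal(matrix, string_splits):
--     groups = {}
--     for row in matrix:
--         parts = row.split(string_splits)
--         groups.setdefault(parts[1], []).append(parts[0])
--     return [[field] + groups[field] for field in sorted(groups)]
-- ===== Notes on version B (the rewrite author's own statement) =====
-- stated objective: idiomatic
-- what changed: A sorts all split rows by their second field and then groups consecutive equal keys in a stateful scan; B groups rows into a dict keyed by the second field in one pass (insertion order = A's stable-sort order within a group) and sorts only the distinct keys.
import Mathlib
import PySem

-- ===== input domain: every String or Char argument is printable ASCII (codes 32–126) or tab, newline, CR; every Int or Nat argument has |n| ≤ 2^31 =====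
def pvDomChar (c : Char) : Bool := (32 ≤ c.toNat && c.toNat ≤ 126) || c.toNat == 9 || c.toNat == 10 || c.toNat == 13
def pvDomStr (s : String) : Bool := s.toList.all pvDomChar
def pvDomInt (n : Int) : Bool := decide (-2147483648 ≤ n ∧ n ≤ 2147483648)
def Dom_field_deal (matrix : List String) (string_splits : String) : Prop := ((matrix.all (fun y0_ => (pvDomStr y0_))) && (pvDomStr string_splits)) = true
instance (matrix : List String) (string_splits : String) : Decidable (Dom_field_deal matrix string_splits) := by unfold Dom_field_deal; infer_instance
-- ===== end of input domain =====

-- B replaces A's sort-all-rows-then-consecutive-scan grouping by a one-pass dict grouping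
-- followed by sorting only the distinct keys (idiomatic; same results on Pre_).


-- i.split(sep); Pre_ guarantees sep ≠ "" (so split? is some) — exact there
def pvSplit (i : String) (sep : String) : List String := (PySem.Str.split? i sep).getD []

-- ===== PORT A =====
def field_deal (matrix : List String) (string_splits : String) : List (List String) :=
  -- a = []; for i in matrix: a.append(i.split(string_splits))
  let a : List (List String) :=
    matrix.foldl (fun acc i => acc ++ [pvSplit i string_splits]) []
  -- a.sort(key=lambda x: x[1]); x[1] / x[0] ported as getD 1 "" / getD 0 "" — exact under
  -- Pre_, which guarantees every split has at least 2 parts (else Python raises IndexError)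
  let s := PySem.List.sorted a (fun x => x.getD 1 "")
  match s with
  | [] => []
  | x :: _ =>
    -- state (field_name, alls, b), scanned over the whole sorted list
    let st :=
      s.foldl (fun (st : String × List String × List (List String)) i =>
          if i.getD 1 "" == st.1 then (st.1, st.2.1 ++ [i.getD 0 ""], st.2.2)
          else (i.getD 1 "", [i.getD 1 "", i.getD 0 ""], st.2.2 ++ [st.2.1]))
        (x.getD 1 "", [x.getD 1 ""], [])
    st.2.2 ++ [st.2.1]

-- ===== PORT B =====
def field_deal_alt (matrix : List String) (string_splits : String) : List (List String) :=
  -- groups = {}; for row: groups.setdefault(parts[1], []).append(parts[0])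
  let groups : PySem.Dict String (List String) :=
    matrix.foldl (fun d row =>
      let parts := pvSplit row string_splits
      d.modify (parts.getD 1 "") [] (fun vs => vs ++ [parts.getD 0 ""])) PySem.Dict.empty
  -- [[field] + groups[field] for field in sorted(groups)]
  (PySem.List.sorted groups.keys (fun k => k)).map (fun k => k :: groups.getD k [])

-- ===== PRECONDITION & SPEC =====
-- Pre_ = exactly the inputs where Python A returns: a nonempty separator whenever some row is
-- split (an empty separator raises ValueError) and every row's split having ≥ 2 parts (else
-- x[1] raises IndexError).
def Pre_field_deal (matrix : List String) (string_splits : String) : Prop :=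
  (matrix = [] ∨ string_splits ≠ "") ∧
    ∀ r ∈ matrix, 2 ≤ ((PySem.Str.split? r string_splits).getD []).length
instance (matrix : List String) (string_splits : String) : Decidable (Pre_field_deal matrix string_splits) := by unfold Pre_field_deal; infer_instance
def pvWitness_field_deal : List String × String := (["x,b", "y,a", "z,b"], ",")
def Spec_field_deal (matrix : List String) (string_splits : String) (out : List (List String)) : Prop := out = field_deal_alt matrix string_splits
instance (matrix : List String) (string_splits : String) (out : List (List String)) : Decidable (Spec_field_deal matrix string_splits out) := by unfold Spec_field_deal; infer_instance

-- ===== CLAIM (what is proved, stated in full; the proofs are below) =====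
def Claim_equal_field_deal : Prop := ∀ (matrix : List String) (string_splits : String), Dom_field_deal matrix string_splits → Pre_field_deal matrix string_splits → Spec_field_deal matrix string_splits (field_deal matrix string_splits)

-- ===== LEMMAS AND PROOFS =====

-- key and value projections of a split row
def pvKey (x : List String) : String := x.getD 1 ""
def pvVal (x : List String) : String := x.getD 0 ""
-- the loop body of port A
def pvStep (st : String × List String × List (List String)) (i : List String) :
    String × List String × List (List String) :=
  if pvKey i == st.1 then (st.1, st.2.1 ++ [pvVal i], st.2.2)
  else (pvKey i, [pvKey i, pvVal i], st.2.2 ++ [st.2.1])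
-- the core of port A after the split list is built
def pvAcore (s : List (List String)) : List (List String) :=
  match s with
  | [] => []
  | x :: _ =>
    ((s.foldl pvStep (pvKey x, [pvKey x], [])).2.2)
      ++ [(s.foldl pvStep (pvKey x, [pvKey x], [])).2.1]
-- the grouped rows for a list of keys
def pvGroups (s : List (List String)) (cs : List String) : List (List String) :=
  cs.map (fun c => c :: (s.filter (fun x => pvKey x == c)).map pvVal)
-- B's grouping dict
def pvG (matrix : List String) (sep : String) : PySem.Dict String (List String) :=
  matrix.foldl (fun d row =>
    d.modify (pvKey (pvSplit row sep)) [] (fun vs => vs ++ [pvVal (pvSplit row sep)]))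
    PySem.Dict.empty

lemma pv_foldl_append {α β : Type} (l : List α) (f : α → β) (acc : List β) :
    l.foldl (fun a x => a ++ [f x]) acc = acc ++ l.map f := by
  induction l generalizing acc <;> simp [*]

lemma pv_dedup_cons (a : String) (l : List String) :
    PySem.List.dedup (a :: l) = a :: (PySem.List.dedup l).filter (fun y => y ≠ a) := by
  have h1 : PySem.List.dedup (a :: l) = PySem.Set.update [a] l := rfl
  rw [h1, PySem.Set.update_eq_append_filter]
  simp [PySem.Set.contains]

lemma pv_dedup_pairwise (R : String → String → Prop) (l : List String) (h : l.Pairwise R) :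
    (PySem.List.dedup l).Pairwise R := by
  induction l with
  | nil => simp
  | cons a l ih =>
    rw [pv_dedup_cons]
    rcases List.pairwise_cons.mp h with ⟨ha, hl⟩
    refine List.pairwise_cons.mpr ⟨?_, List.Pairwise.filter _ (ih hl)⟩
    intro y hy
    exact ha y ((PySem.List.mem_dedup _ _).mp (List.mem_of_mem_filter hy))

lemma pv_insertBy_filter (x : List String) (acc : List (List String)) (c : String)
    (hacc : acc.Pairwise (fun a b => pvKey a ≤ pvKey b)) :
    (PySem.List.insertBy (fun a b => decide (pvKey a < pvKey b)) x acc).filter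
        (fun y => pvKey y == c)
      = acc.filter (fun y => pvKey y == c) ++ (if pvKey x == c then [x] else []) := by
  induction acc with
  | nil =>
    show List.filter _ [x] = _
    cases h : (pvKey x == c) <;> simp [h]
  | cons y ys ih =>
    rw [show PySem.List.insertBy (fun a b => decide (pvKey a < pvKey b)) x (y :: ys)
        = if decide (pvKey x < pvKey y) then x :: y :: ys
          else y :: PySem.List.insertBy (fun a b => decide (pvKey a < pvKey b)) x ys from rfl]
    rcases List.pairwise_cons.mp hacc with ⟨hy, hys⟩
    by_cases hlt : pvKey x < pvKey y
    · rw [if_pos (by simpa using hlt)]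
      by_cases hc : pvKey x = c
      · have hnone : (y :: ys).filter (fun z => pvKey z == c) = [] := by
          rw [List.filter_eq_nil_iff]
          intro z hz
          have hz' : pvKey y ≤ pvKey z := by
            rcases List.mem_cons.mp hz with rfl | hz2
            · exact le_refl _
            · exact hy z hz2
          have : c < pvKey z := lt_of_lt_of_le (hc ▸ hlt) hz'
          simp [beq_iff_eq, (ne_of_gt this)]
        rw [List.filter_cons, if_pos (by simp [hc]), hnone]
        simp [hc]
      · rw [List.filter_cons, if_neg (by simp [hc])]
        simp [hc]
    · rw [if_neg (by simpa using hlt)]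
      rw [List.filter_cons, List.filter_cons, ih hys]
      cases h : (pvKey y == c) <;> simp
  
-- stability: filtering one key class out of the stable sort gives the original order
lemma pv_sorted_filter (l : List (List String)) (c : String) :
    (PySem.List.sorted l pvKey).filter (fun x => pvKey x == c)
      = l.filter (fun x => pvKey x == c) := by
  rw [PySem.List.sorted_eq_foldl_insertBy]
  induction l using List.reverseRecOn with
  | nil => simp
  | append_singleton l x ih =>
    rw [List.foldl_append, List.foldl_cons, List.foldl_nil]
    have hacc : (List.foldl (fun acc x =>
        PySem.List.insertBy (fun a b => decide (pvKey a < pvKey b)) x acc) [] l).Pairwise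
        (fun a b => pvKey a ≤ pvKey b) := by
      have h := PySem.List.sorted_pairwise l pvKey
      rwa [PySem.List.sorted_eq_foldl_insertBy] at h
    rw [pv_insertBy_filter x _ c hacc, ih, List.filter_append]
    congr 1
    cases h : (pvKey x == c) <;> simp [h]

lemma pvGroups_sorted (l : List (List String)) (cs : List String) :
    pvGroups (PySem.List.sorted l pvKey) cs = pvGroups l cs := by
  unfold pvGroups
  exact List.map_congr_left fun c _ => by rw [pv_sorted_filter]

lemma pv_scan_aux (s : List (List String)) (fn : String) (alls : List String)
    (b : List (List String))
    (hs : s.Pairwise (fun a b => pvKey a ≤ pvKey b)) (hfn : ∀ x ∈ s, fn ≤ pvKey x) :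
    (s.foldl pvStep (fn, alls, b)).2.2 ++ [(s.foldl pvStep (fn, alls, b)).2.1]
      = b ++ [alls ++ (s.filter (fun x => pvKey x == fn)).map pvVal]
          ++ pvGroups s ((PySem.List.dedup (s.map pvKey)).filter (fun y => y ≠ fn)) := by
  induction s generalizing fn alls b with
  | nil => simp [pvGroups]
  | cons x s ih =>
    rcases List.pairwise_cons.mp hs with ⟨hx, hs'⟩
    by_cases hk : pvKey x = fn
    · have hstep : pvStep (fn, alls, b) x = (fn, alls ++ [pvVal x], b) := by
        simp [pvStep, hk]
      have hfn' : ∀ z ∈ s, fn ≤ pvKey z := fun z hz => hfn z (List.mem_cons_of_mem _ hz)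
      rw [List.foldl_cons, hstep, ih fn (alls ++ [pvVal x]) b hs' hfn']
      have e1 : (x :: s).filter (fun z => pvKey z == fn)
          = x :: s.filter (fun z => pvKey z == fn) := by
        rw [List.filter_cons, if_pos (by simp [hk])]
      have e2 : (PySem.List.dedup ((x :: s).map pvKey)).filter (fun y => y ≠ fn)
          = (PySem.List.dedup (s.map pvKey)).filter (fun y => y ≠ fn) := by
        rw [List.map_cons, pv_dedup_cons, hk, List.filter_cons, if_neg (by simp),
          List.filter_filter]
        exact List.filter_congr fun y _ => by simp
      have e3 : pvGroups (x :: s) ((PySem.List.dedup (s.map pvKey)).filter (fun y => y ≠ fn))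
          = pvGroups s ((PySem.List.dedup (s.map pvKey)).filter (fun y => y ≠ fn)) := by
        unfold pvGroups
        refine List.map_congr_left fun d hd => ?_
        have hdne : d ≠ fn := by simpa using (List.mem_filter.mp hd).2
        rw [List.filter_cons, if_neg (by simp [hk, Ne.symm hdne])]
      rw [e1, e2, e3]
      simp
    · have hlt : fn < pvKey x :=
        lt_of_le_of_ne (hfn x (List.mem_cons_self)) (Ne.symm hk)
      have hstep : pvStep (fn, alls, b) x = (pvKey x, [pvKey x, pvVal x], b ++ [alls]) := by
        simp [pvStep, hk]
      have hfn' : ∀ z ∈ s, pvKey x ≤ pvKey z := fun z hz => hx z hz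
      rw [List.foldl_cons, hstep, ih (pvKey x) [pvKey x, pvVal x] (b ++ [alls]) hs' hfn']
      have hgt : ∀ z ∈ s, fn < pvKey z := fun z hz => lt_of_lt_of_le hlt (hfn' z hz)
      have e1 : (x :: s).filter (fun z => pvKey z == fn) = [] := by
        rw [List.filter_eq_nil_iff]
        intro z hz
        rcases List.mem_cons.mp hz with rfl | hz2
        · simp [beq_iff_eq, hk]
        · simp [beq_iff_eq, ne_of_gt (hgt z hz2)]
      have e2 : (PySem.List.dedup ((x :: s).map pvKey)).filter (fun y => y ≠ fn)
          = pvKey x :: (PySem.List.dedup (s.map pvKey)).filter (fun y => y ≠ pvKey x) := by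
        rw [List.map_cons, pv_dedup_cons, List.filter_cons,
          if_pos (by simpa using hk), List.filter_filter]
        congr 1
        refine List.filter_congr fun y hy => ?_
        obtain ⟨z, hz, rfl⟩ := List.mem_map.mp ((PySem.List.mem_dedup _ _).mp hy)
        simp [ne_of_gt (hgt z hz)]
      have e3 : pvGroups (x :: s)
            (pvKey x :: (PySem.List.dedup (s.map pvKey)).filter (fun y => y ≠ pvKey x))
          = ((pvKey x :: pvVal x :: (s.filter (fun z => pvKey z == pvKey x)).map pvVal))
            :: pvGroups s ((PySem.List.dedup (s.map pvKey)).filter (fun y => y ≠ pvKey x)) := by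
        unfold pvGroups
        rw [List.map_cons]
        congr 1
        · rw [List.filter_cons, if_pos (by simp)]
          simp
        · refine List.map_congr_left fun d hd => ?_
          have hdne : d ≠ pvKey x := by simpa using (List.mem_filter.mp hd).2
          rw [List.filter_cons, if_neg (by simp [Ne.symm hdne])]
      rw [e1, e2, e3]
      simp [pvGroups]

lemma pv_A_eq (matrix : List String) (sep : String) :
    field_deal matrix sep
      = pvGroups (matrix.map (fun i => pvSplit i sep))
          (PySem.List.dedup
            ((PySem.List.sorted (matrix.map (fun i => pvSplit i sep)) pvKey).map pvKey)) := by
  have hA : field_deal matrix sep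
      = pvAcore (PySem.List.sorted
          (matrix.foldl (fun acc i => acc ++ [pvSplit i sep]) []) pvKey) := rfl
  rw [hA, pv_foldl_append, List.nil_append]
  cases hs0 : PySem.List.sorted (matrix.map (fun i => pvSplit i sep)) pvKey with
  | nil => simp [pvAcore, pvGroups, PySem.List.dedup, PySem.Set.ofList, PySem.Set.empty]
  | cons x t =>
    simp only [pvAcore]
    have hpw : (x :: t).Pairwise (fun a b => pvKey a ≤ pvKey b) := by
      have h := PySem.List.sorted_pairwise (matrix.map (fun i => pvSplit i sep)) pvKey
      rwa [hs0] at h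
    have hfn : ∀ z ∈ x :: t, pvKey x ≤ pvKey z := by
      intro z hz
      rcases List.mem_cons.mp hz with rfl | hz2
      · exact le_refl _
      · exact (List.pairwise_cons.mp hpw).1 z hz2
    rw [pv_scan_aux (x :: t) (pvKey x) [pvKey x] [] hpw hfn, List.nil_append]
    rw [show (x :: t).map pvKey = pvKey x :: t.map pvKey from rfl, pv_dedup_cons]
    have e2 : (pvKey x :: (PySem.List.dedup (t.map pvKey)).filter (fun y => y ≠ pvKey x)).filter
        (fun y => y ≠ pvKey x)
        = (PySem.List.dedup (t.map pvKey)).filter (fun y => y ≠ pvKey x) := by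
      rw [List.filter_cons, if_neg (by simp), List.filter_filter]
      exact List.filter_congr fun y _ => by simp
    rw [e2]
    have e3 : pvGroups (matrix.map (fun i => pvSplit i sep))
          (pvKey x :: (PySem.List.dedup (t.map pvKey)).filter (fun y => y ≠ pvKey x))
        = (pvKey x :: ((x :: t).filter (fun z => pvKey z == pvKey x)).map pvVal)
          :: pvGroups (x :: t)
            ((PySem.List.dedup (t.map pvKey)).filter (fun y => y ≠ pvKey x)) := by
      have h1 := pvGroups_sorted (matrix.map (fun i => pvSplit i sep))
        (pvKey x :: (PySem.List.dedup (t.map pvKey)).filter (fun y => y ≠ pvKey x))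
      rw [hs0] at h1
      rw [← h1]
      unfold pvGroups
      rw [List.map_cons]
    rw [e3]
    simp

lemma pv_B_eq (matrix : List String) (sep : String) :
    field_deal_alt matrix sep
      = pvGroups (matrix.map (fun i => pvSplit i sep))
          (PySem.List.sorted
            (PySem.Set.ofList ((matrix.map (fun i => pvSplit i sep)).map pvKey))
            (fun k => k)) := by
  have hG : field_deal_alt matrix sep
      = (PySem.List.sorted (pvG matrix sep).keys (fun k => k)).map
          (fun k => k :: (pvG matrix sep).getD k []) := rfl
  have hkeys : (pvG matrix sep).keys
      = PySem.Set.ofList ((matrix.map (fun i => pvSplit i sep)).map pvKey) := by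
    have h := PySem.Dict.keys_foldl_modify_key (κ := String) (ν := List String) matrix
      (fun row => pvKey (pvSplit row sep)) []
      (fun _ row vs => vs ++ [pvVal (pvSplit row sep)]) PySem.Dict.empty
    rw [show (pvG matrix sep).keys
        = (matrix.foldl (fun d row => d.modify (pvKey (pvSplit row sep)) []
            (fun vs => vs ++ [pvVal (pvSplit row sep)])) PySem.Dict.empty).keys from rfl]
    rw [h, PySem.Dict.keys_empty, PySem.Set.update_nil_left, List.map_map]
    rfl
  have hget : ∀ c, (pvG matrix sep).getD c []
      = ((matrix.map (fun i => pvSplit i sep)).filter (fun x => pvKey x == c)).map pvVal := by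
    intro c
    have h2 : pvG matrix sep
        = (matrix.map (fun row => (pvKey (pvSplit row sep), pvVal (pvSplit row sep)))).foldl
            (fun d p => d.modify p.1 [] (fun vs => vs ++ [p.2])) PySem.Dict.empty := by
      rw [List.foldl_map]
      rfl
    rw [h2, PySem.Dict.getD_foldl_modify_append, PySem.Dict.getD_empty, List.nil_append,
      List.filter_map, List.map_map, List.filter_map, List.map_map]
    rfl
  rw [hG, hkeys]
  unfold pvGroups
  refine List.map_congr_left fun k _ => ?_
  rw [hget]

lemma pv_keys_eq (l : List (List String)) :
    PySem.List.sorted (PySem.Set.ofList (l.map pvKey)) (fun k => k)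
      = PySem.List.dedup ((PySem.List.sorted l pvKey).map pvKey) := by
  apply PySem.List.sorted_eq_of_perm_of_pairwise_lt
  · refine (List.perm_ext_iff_of_nodup (PySem.List.nodup_dedup _) (PySem.Set.nodup_ofList _)).mpr
      fun a => ?_
    rw [PySem.List.mem_dedup, PySem.Set.mem_ofList]
    constructor
    · rintro h
      obtain ⟨z, hz, rfl⟩ := List.mem_map.mp h
      exact List.mem_map.mpr ⟨z, (PySem.List.mem_sorted _ _ _ _).mp hz, rfl⟩
    · rintro h
      obtain ⟨z, hz, rfl⟩ := List.mem_map.mp h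
      exact List.mem_map.mpr ⟨z, (PySem.List.mem_sorted _ _ _ _).mpr hz, rfl⟩
  · have hle : ((PySem.List.sorted l pvKey).map pvKey).Pairwise (· ≤ ·) :=
      List.pairwise_map.mpr (PySem.List.sorted_pairwise l pvKey)
    have h1 := pv_dedup_pairwise _ _ hle
    have h2 : (PySem.List.dedup ((PySem.List.sorted l pvKey).map pvKey)).Pairwise (· ≠ ·) :=
      PySem.List.nodup_dedup _
    exact (h1.and h2).imp fun ⟨ha, hb⟩ => lt_of_le_of_ne ha hb

-- ===== VERDICT (by name: the statement is the Claim_ definition above) =====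
theorem field_deal_spec : Claim_equal_field_deal := by
  intro matrix sep _ _
  unfold Spec_field_deal
  rw [pv_A_eq, pv_B_eq, pv_keys_eq]
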